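-- pv_equiv track=rewrite | github.com/brianbest/capebretontransit | scripts/parse-schedules.py | get_stop_column_ranges
-- ===== SOURCE A (Python) =====
-- def get_stop_column_ranges(header: list) -> list[tuple[int, int]]:
--     """Identify column ranges for each stop based on non-empty header cells.
--
--     Returns list of (start, end) tuples where start is inclusive and end exclusive.
--     Each range corresponds to one stop in the schedule table.
--     """
--     stop_starts = []
--     for i, cell in enumerate(header):
--         if cell is not None and isinstance(cell, str) and cell.strip():
--             stop_starts.append(i)
--
--     ranges = []
--     for i, start in enumerate(stop_starts):
--         end = stop_starts[i + 1] if i + 1 < len(stop_starts) else len(header)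
--         ranges.append((start, end))
--
--     return ranges
-- ===== SOURCE B (Python) =====
-- def get_stop_column_ranges(header: list) -> list[tuple[int, int]]:
--     """Identify column ranges for each stop based on non-empty header cells.
--
--     Single pass: keep one pending start index instead of building the
--     intermediate stop_starts table and re-indexing it.
--     """
--     ranges = []
--     pending = None
--     for i, cell in enumerate(header):
--         if cell is not None and isinstance(cell, str) and cell.strip():
--             if pending is not None:
--                 ranges.append((pending, i))
--             pending = i
--     if pending is not None:
--         ranges.append((pending, len(header)))
--     return ranges
-- ===== Notes on version B (the rewrite author's own statement) =====
-- stated objective: simpler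
-- what changed: B does one pass over header keeping a single pending start index, instead of building the stop_starts index list and then re-indexing it in a second enumerate loop.
import Mathlib
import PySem

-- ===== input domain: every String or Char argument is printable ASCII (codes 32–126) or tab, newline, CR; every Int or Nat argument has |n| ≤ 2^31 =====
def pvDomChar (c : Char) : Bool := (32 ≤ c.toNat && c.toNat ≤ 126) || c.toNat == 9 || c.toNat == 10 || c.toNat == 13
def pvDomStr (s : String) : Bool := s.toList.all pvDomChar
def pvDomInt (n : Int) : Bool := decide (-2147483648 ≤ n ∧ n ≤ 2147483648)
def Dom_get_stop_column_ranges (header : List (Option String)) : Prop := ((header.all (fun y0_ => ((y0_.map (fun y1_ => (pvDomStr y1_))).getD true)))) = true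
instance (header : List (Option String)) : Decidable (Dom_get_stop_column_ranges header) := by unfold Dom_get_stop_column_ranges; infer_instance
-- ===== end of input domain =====

-- ===== PORT A =====
-- B is a single-pass re-decomposition of A (one pending start index instead of
-- building stop_starts and re-indexing it); same return value, no side effects.

-- 'cell is not None and isinstance(cell, str) and cell.strip()' (header cells are Optional[str])
def pvQual (cell : Option String) : Bool :=
  match cell with
  | none => false
  | some s => !((PySem.Str.strip s) == "")

def get_stop_column_ranges (header : List (Option String)) : List (Int × Int) :=
  let stop_starts : List Int :=
    (PySem.List.enumerate header).foldl
      (fun acc p => if pvQual p.2 then acc ++ [p.1] else acc) []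
  (PySem.List.enumerate stop_starts).foldl
    (fun acc p =>
      acc ++ [(p.2,
        if p.1 + 1 < (stop_starts.length : Int) then PySem.List.pyGetD stop_starts (p.1 + 1) 0
        else (header.length : Int))]) []

-- ===== PORT B =====
def get_stop_column_ranges_alt (header : List (Option String)) : List (Int × Int) :=
  let st :=
    (PySem.List.enumerate header).foldl
      (fun (st : List (Int × Int) × Option Int) p =>
        if pvQual p.2 then
          match st.2 with
          | some pnd => (st.1 ++ [(pnd, p.1)], some p.1)
          | none => (st.1, some p.1)
        else st)
      ([], none)
  match st.2 with
  | some pnd => st.1 ++ [(pnd, (header.length : Int))]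
  | none => st.1

-- ===== PRECONDITION & SPEC =====
def Spec_get_stop_column_ranges (header : List (Option String)) (out : List (Int × Int)) : Prop := out = get_stop_column_ranges_alt header
instance (header : List (Option String)) (out : List (Int × Int)) : Decidable (Spec_get_stop_column_ranges header out) := by unfold Spec_get_stop_column_ranges; infer_instance

-- ===== CLAIM (what is proved, stated in full; the proofs are below) =====
def Claim_equal_get_stop_column_ranges : Prop := ∀ (header : List (Option String)), Dom_get_stop_column_ranges header → Spec_get_stop_column_ranges header (get_stop_column_ranges header)

-- ===== LEMMAS AND PROOFS =====

-- the successive (start, end) pairs produced from a list of start indices and the final end L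
def pvChain : List Int → Int → List (Int × Int)
  | [], _ => []
  | [x], L => [(x, L)]
  | x :: y :: r, L => (x, y) :: pvChain (y :: r) L

theorem pvChain_length (ss : List Int) (L : Int) : (pvChain ss L).length = ss.length := by
  induction ss, L using pvChain.induct <;> simp [pvChain, *]

theorem pvChain_getElem (ss : List Int) (L : Int) (k : Nat) (hk : k < ss.length)
    (h2 : k < (pvChain ss L).length) :
    (pvChain ss L)[k] = (ss[k], if k + 1 < ss.length then ss.getD (k + 1) 0 else L) := by
  induction ss, L using pvChain.induct generalizing k with
  | case1 L => simp at hk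
  | case2 x L =>
      have h0 : k = 0 := by simp at hk; omega
      subst h0; simp [pvChain]
  | case3 x y r L ih =>
      match k with
      | 0 => simp [pvChain]
      | Nat.succ n =>
          have hn : n < (y :: r).length := by simpa using hk
          have hn2 : n < (pvChain (y :: r) L).length := by rw [pvChain_length]; exact hn
          have := ih n hn hn2
          simp only [pvChain, List.getElem_cons_succ, this, List.length_cons, List.getD_cons_succ]
          have hiff : n.succ + 1 < r.length + 1 + 1 ↔ n + 1 < r.length + 1 := by omega
          simp [hiff]

-- A's second loop equals pvChain of the start list
theorem pvA_eq_chain (ss : List Int) (L : Int) :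
    (PySem.List.enumerate ss).foldl
      (fun acc p =>
        acc ++ [(p.2,
          if p.1 + 1 < (ss.length : Int) then PySem.List.pyGetD ss (p.1 + 1) 0
          else L)]) []
      = pvChain ss L := by
  rw [PySem.List.foldl_append_singleton_eq_map, List.nil_append]
  refine List.ext_getElem (by simp [pvChain_length, PySem.List.length_enumerate]) ?_
  intro k h1 h2
  have hk : k < ss.length := by simpa [PySem.List.length_enumerate] using h1
  have he : k < (PySem.List.enumerate ss 0).length := by
    simpa [PySem.List.length_enumerate] using hk
  rw [List.getElem_map, pvChain_getElem ss L k hk h2, PySem.List.getElem_enumerate]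
  have hcast : ((0:Int) + (k:Int)) + 1 = ((k+1 : Nat) : Int) := by push_cast; ring
  simp only [hcast, PySem.List.pyGetD_natCast]
  congr 1
  by_cases h : k + 1 < ss.length
  · have : ((k+1 : Nat) : Int) < (ss.length : Int) := by exact_mod_cast h
    simp [h, this]
    intro h'
    exfalso
    omega
  · have h' : ¬ ((k+1 : Nat) : Int) < (ss.length : Int) := by exact_mod_cast h
    simp [h]
    intro h''
    exfalso
    omega

-- what B's fold does, expressed on the list of qualifying indices it will still meet
def pvStepAll : List Int → List (Int × Int) × Option Int → List (Int × Int) × Option Int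
  | [], st => st
  | x :: r, st =>
      match st.2 with
      | some pnd => pvStepAll r (st.1 ++ [(pnd, x)], some x)
      | none => pvStepAll r (st.1, some x)

theorem pvB_fold_eq_stepAll (hs : List (Option String)) (s : Int)
    (st : List (Int × Int) × Option Int) :
    (PySem.List.enumerate hs s).foldl
      (fun (st : List (Int × Int) × Option Int) p =>
        if pvQual p.2 then
          match st.2 with
          | some pnd => (st.1 ++ [(pnd, p.1)], some p.1)
          | none => (st.1, some p.1)
        else st) st
    = pvStepAll (((PySem.List.enumerate hs s).filter (fun p => pvQual p.2)).map Prod.fst) st := by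
  induction hs generalizing s st with
  | nil => simp [PySem.List.enumerate_nil, pvStepAll]
  | cons c t ih =>
      rw [PySem.List.enumerate_cons]
      by_cases hq : pvQual c
      · simp only [List.foldl_cons, List.filter_cons, hq, if_pos, List.map_cons]
        cases hp : st.2 with
        | some pnd => simp only [hq, hp, if_true, ih, pvStepAll]
        | none => simp only [hq, hp, if_true, ih, pvStepAll]
      · simp only [List.foldl_cons, List.filter_cons, hq, if_neg, Bool.false_eq_true,
          not_false_iff, ih]

-- finishing B's state yields pvChain of the pending start followed by the remaining starts
theorem pvStepAll_chain (q : List Int) (acc : List (Int × Int)) (pnd : Option Int) (L : Int) :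
    (match (pvStepAll q (acc, pnd)).2 with
      | some x => (pvStepAll q (acc, pnd)).1 ++ [(x, L)]
      | none => (pvStepAll q (acc, pnd)).1)
    = acc ++ (match pnd with
      | some x => pvChain (x :: q) L
      | none => pvChain q L) := by
  induction q generalizing acc pnd with
  | nil =>
      cases pnd <;> simp [pvStepAll, pvChain]
  | cons x r ih =>
      cases pnd with
      | none => simpa [pvStepAll] using ih acc (some x)
      | some pv =>
          have := ih (acc ++ [(pv, x)]) (some x)
          simp only [pvStepAll] at this ⊢
          rw [this]
          cases r <;> simp [pvChain]

-- ===== VERDICT (by name: the statement is the Claim_ definition above) =====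
theorem get_stop_column_ranges_spec : Claim_equal_get_stop_column_ranges := by
  intro header _
  unfold Spec_get_stop_column_ranges get_stop_column_ranges get_stop_column_ranges_alt
  rw [PySem.List.foldl_append_if, pvB_fold_eq_stepAll, pvA_eq_chain]
  have := pvStepAll_chain
    (((PySem.List.enumerate header).filter (fun p => pvQual p.2)).map Prod.fst)
    [] none (header.length : Int)
  simpa using this.symm
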